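-- pv_equiv track=rewrite | github.com/whyj107/Algorithm | CodeWar/20200613_Adjacent_repeated_words_in_a_string.py | count_adjacent_pairs
-- ===== SOURCE A (Python) =====
-- def count_adjacent_pairs(st):
--     answer = 0
--     tmp = True
--     pre = ''
--     for i in st.split(' '):
--         if i != '':
--             if pre == i.lower():
--                 if tmp:
--                     tmp = False
--                     answer += 1
--             else:
--                 tmp = True
--         pre = i.lower()
--     return answer
-- ===== SOURCE B (Python) =====
-- def count_adjacent_pairs(st):
--     tokens = [w.lower() for w in st.split(' ')]
--     count = 0
--     i = 0
--     n = len(tokens)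
--     while i < n:
--         j = i + 1
--         while j < n and tokens[j] == tokens[i]:
--             j += 1
--         if tokens[i] != '' and j - i >= 2:
--             count += 1
--         i = j
--     return count
-- ===== Notes on version B (the rewrite author's own statement) =====
-- stated objective: alternative
-- what changed: B lowercases the token list once and counts maximal runs with an explicit two-pointer run scan (count a run iff its token is non-empty and its length is >= 2), replacing A's single pass with the tmp/pre flag bookkeeping that fires once per run.
import Mathlib
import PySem

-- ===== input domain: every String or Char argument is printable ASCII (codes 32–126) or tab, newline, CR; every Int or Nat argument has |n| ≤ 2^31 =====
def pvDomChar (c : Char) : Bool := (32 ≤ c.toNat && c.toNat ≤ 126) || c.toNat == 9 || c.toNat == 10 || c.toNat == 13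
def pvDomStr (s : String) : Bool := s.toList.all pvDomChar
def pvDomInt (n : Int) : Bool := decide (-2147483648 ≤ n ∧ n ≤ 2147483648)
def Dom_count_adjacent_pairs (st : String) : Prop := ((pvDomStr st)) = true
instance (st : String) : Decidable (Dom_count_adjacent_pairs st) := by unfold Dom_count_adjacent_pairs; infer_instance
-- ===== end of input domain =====

-- B replaces A's tmp/pre flag bookkeeping with an explicit scan over maximal runs of the
-- lowercased token list (count a run iff its token is non-empty and its length is ≥ 2);
-- same cost, alternative decomposition.

-- ===== PORT A =====
-- one iteration of A's for-loop; state = (answer, tmp, pre)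
def pvStepA (s : Int × Bool × String) (i : String) : Int × Bool × String :=
  let answer := s.1
  let tmp := s.2.1
  let pre := s.2.2
  let p :=
    if i ≠ "" then
      if pre = PySem.Str.lower i then
        if tmp then (answer + 1, false) else (answer, tmp)
      else (answer, true)
    else (answer, tmp)
  (p.1, p.2, PySem.Str.lower i)

-- st.split(' '): split? is none only for the empty separator, so getD [] never fires
def count_adjacent_pairs (st : String) : Int :=
  (((PySem.Str.split? st " ").getD []).foldl pvStepA (0, true, "")).1

-- ===== PORT B =====
-- the outer while loop of Source B: consume one maximal run per step
-- (the inner `j += 1` while loop = takeWhile/dropWhile on the tail)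
def pvRuns (ts : List String) : Int :=
  match ts with
  | [] => 0
  | x :: xs =>
      (if x ≠ "" ∧ (xs.takeWhile (· = x)).length + 1 ≥ 2 then (1 : Int) else 0)
        + pvRuns (xs.dropWhile (· = x))
termination_by ts.length
decreasing_by
  simp only [List.length_cons]
  exact Nat.lt_succ_of_le (List.length_dropWhile_le _ _)

def count_adjacent_pairs_alt (st : String) : Int :=
  pvRuns (((PySem.Str.split? st " ").getD []).map PySem.Str.lower)

-- ===== PRECONDITION & SPEC =====
def Spec_count_adjacent_pairs (st : String) (out : Int) : Prop := out = count_adjacent_pairs_alt st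
instance (st : String) (out : Int) : Decidable (Spec_count_adjacent_pairs st out) := by unfold Spec_count_adjacent_pairs; infer_instance

-- ===== CLAIM (what is proved, stated in full; the proofs are below) =====
def Claim_equal_count_adjacent_pairs : Prop := ∀ (st : String), Dom_count_adjacent_pairs st → Spec_count_adjacent_pairs st (count_adjacent_pairs st)

-- ===== LEMMAS AND PROOFS =====

-- A's step with tokens pre-lowercased (the shape A's fold takes after List.foldl_map)
def pvStepB (s : Int × Bool × String) (t : String) : Int × Bool × String :=
  let answer := s.1
  let tmp := s.2.1
  let pre := s.2.2
  let p :=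
    if t ≠ "" then
      if pre = t then
        if tmp then (answer + 1, false) else (answer, tmp)
      else (answer, true)
    else (answer, tmp)
  (p.1, p.2, t)

lemma pv_lower_eq_empty_iff (s : String) : PySem.Str.lower s = "" ↔ s = "" := by
  constructor
  · intro h
    have h2 : PySem.Chars.lower s.toList = [] := by
      rw [← PySem.Str.toList_lower, h]; rfl
    have h3 : s.toList = [] := by
      cases hl : s.toList with
      | nil => rfl
      | cons c t => rw [hl] at h2; simp [PySem.Chars.lower] at h2
    exact String.toList_eq_nil_iff.mp h3
  · intro h; subst h; rfl

lemma pv_stepA_eq_stepB (s : Int × Bool × String) (i : String) :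
    pvStepA s i = pvStepB s (PySem.Str.lower i) := by
  simp only [pvStepA, pvStepB]
  by_cases h : i = ""
  · simp [h, pv_lower_eq_empty_iff]
  · have : PySem.Str.lower i ≠ "" := fun hc => h ((pv_lower_eq_empty_iff i).mp hc)
    simp [h, this]

-- the head of ts does not (nontrivially) continue a run ending in pre
def pvFresh (pre : String) (ts : List String) : Prop :=
  ∀ y, ts.head? = some y → (y = "" ∨ y ≠ pre)

-- a run of x's after the first counted pair leaves the state untouched (tmp is off)
lemma pv_loop_run (x : String) (hx : x ≠ "") :
    ∀ (l : List String) (ans : Int), (∀ y ∈ l, y = x) →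
      l.foldl pvStepB (ans, false, x) = (ans, false, x) := by
  intro l
  induction l with
  | nil => intro ans _; rfl
  | cons y t ih =>
      intro ans hall
      have hy : y = x := hall y (List.mem_cons_self ..)
      subst hy
      have hstep : pvStepB (ans, false, y) y = (ans, false, y) := by
        simp [pvStepB, hx]
      rw [List.foldl_cons, hstep]
      exact ih ans (fun z hz => hall z (List.mem_cons_of_mem _ hz))

-- a run of empty tokens only rewrites pre to ""
lemma pv_loop_empties :
    ∀ (l : List String) (ans : Int) (tmp : Bool), (∀ y ∈ l, y = "") →
      l.foldl pvStepB (ans, tmp, "") = (ans, tmp, "") := by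
  intro l
  induction l with
  | nil => intro ans tmp _; rfl
  | cons y t ih =>
      intro ans tmp hall
      have hy : y = "" := hall y (List.mem_cons_self ..)
      subst hy
      have hstep : pvStepB (ans, tmp, "") "" = (ans, tmp, "") := by
        simp [pvStepB]
      rw [List.foldl_cons, hstep]
      exact ih ans tmp (fun z hz => hall z (List.mem_cons_of_mem _ hz))

lemma pv_dropWhile_head_not {α : Type} (p : α → Bool) :
    ∀ (l : List α) (y : α), (l.dropWhile p).head? = some y → p y = false := by
  intro l
  induction l with
  | nil => intro y h; simp [List.dropWhile] at h
  | cons z t ih =>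
      intro y h
      by_cases hz : p z
      · rw [List.dropWhile_cons_of_pos hz] at h
        exact ih y h
      · rw [List.dropWhile_cons_of_neg hz] at h
        simp at h
        subst h
        exact Bool.eq_false_iff.mpr hz

-- main invariant: from a fresh state, A's fold adds exactly the number of counted runs
lemma pv_main : ∀ (n : ℕ) (ts : List String), ts.length = n →
    ∀ (ans : Int) (tmp : Bool) (pre : String), pvFresh pre ts →
      (ts.foldl pvStepB (ans, tmp, pre)).1 = ans + pvRuns ts := by
  intro n
  induction n using Nat.strong_induction_on with
  | _ n ih =>
    intro ts hlen ans tmp pre hfresh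
    cases ts with
    | nil => simp [pvRuns]
    | cons x xs =>
      have hxf : x = "" ∨ x ≠ pre := hfresh x rfl
      have hsplit : xs.takeWhile (· = x) ++ xs.dropWhile (· = x) = xs :=
        List.takeWhile_append_dropWhile
      have hdle : (xs.dropWhile (· = x)).length ≤ xs.length := List.length_dropWhile_le _ _
      have hlen' : xs.length + 1 = n := by simpa using hlen
      have hdlen : (xs.dropWhile (· = x)).length < n := by omega
      have hdfresh : ∀ pre' : String,
          (∀ y, (xs.dropWhile (· = x)).head? = some y → y ≠ x → (y = "" ∨ y ≠ pre')) →
          pvFresh pre' (xs.dropWhile (· = x)) := by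
        intro pre' h y hy
        have hnx := pv_dropWhile_head_not (fun z => decide (z = x)) xs y hy
        exact h y hy (by simpa using hnx)
      have hfold : ∀ s : Int × Bool × String,
          xs.foldl pvStepB s = (xs.takeWhile (· = x) ++ xs.dropWhile (· = x)).foldl pvStepB s := by
        intro s; rw [hsplit]
      rw [pvRuns]
      by_cases hx : x = ""
      · subst hx
        have hrall : ∀ y ∈ xs.takeWhile (· = ""), y = "" := fun y hy => by
          simpa using List.mem_takeWhile_imp hy
        have hstep : pvStepB (ans, tmp, pre) "" = (ans, tmp, "") := by simp [pvStepB]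
        rw [List.foldl_cons, hstep, hfold, List.foldl_append,
            pv_loop_empties _ ans tmp hrall]
        have hfr : pvFresh "" (xs.dropWhile (· = "")) :=
          hdfresh "" (fun y _ hyx => Or.inr hyx)
        rw [ih _ hdlen _ rfl ans tmp "" hfr]
        simp
      · have hxp : x ≠ pre := hxf.resolve_left hx
        have hstep : pvStepB (ans, tmp, pre) x = (ans, true, x) := by
          simp [pvStepB, hx, Ne.symm hxp]
        have hfr : pvFresh x (xs.dropWhile (· = x)) := hdfresh x (fun y _ hyx => Or.inr hyx)
        rw [List.foldl_cons, hstep, hfold, List.foldl_append]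
        cases hr : xs.takeWhile (· = x) with
        | nil =>
          have hd2 : xs.dropWhile (· = x) = xs := by
            rw [hr] at hsplit; simpa using hsplit
          rw [List.foldl_nil, ih _ hdlen _ rfl ans true x hfr]
          simp
        | cons z r' =>
          have hz : z = x := by
            have hmem : z ∈ xs.takeWhile (· = x) := by
              rw [hr]; exact List.mem_cons_self ..
            simpa using List.mem_takeWhile_imp hmem
          subst hz
          have hstep2 : pvStepB (ans, true, z) z = (ans + 1, false, z) := by
            simp [pvStepB, hx]
          have hr'all : ∀ y ∈ r', y = z := by
            intro y hy
            have hmem : y ∈ xs.takeWhile (· = z) := by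
              rw [hr]; exact List.mem_cons_of_mem _ hy
            simpa using List.mem_takeWhile_imp hmem
          rw [List.foldl_cons, hstep2, pv_loop_run z hx r' (ans + 1) hr'all,
              ih _ hdlen _ rfl (ans + 1) false z hfr]
          have hcond : z ≠ "" ∧ (z :: r').length + 1 ≥ 2 := ⟨hx, by simp⟩
          rw [if_pos hcond]; ring

-- ===== VERDICT (by name: the statement is the Claim_ definition above) =====
theorem count_adjacent_pairs_spec : Claim_equal_count_adjacent_pairs := by
  intro st _
  unfold Spec_count_adjacent_pairs count_adjacent_pairs count_adjacent_pairs_alt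
  have h1 : ((PySem.Str.split? st " ").getD []).foldl pvStepA (0, true, "") =
      (((PySem.Str.split? st " ").getD []).map PySem.Str.lower).foldl pvStepB (0, true, "") := by
    have hfun : pvStepA = fun s i => pvStepB s (PySem.Str.lower i) := by
      funext s i; exact pv_stepA_eq_stepB s i
    rw [List.foldl_map, ← hfun]
  have hfr : pvFresh "" (((PySem.Str.split? st " ").getD []).map PySem.Str.lower) := by
    intro y _
    by_cases hy : y = ""
    · exact Or.inl hy
    · exact Or.inr hy
  rw [h1, pv_main _ _ rfl 0 true "" hfr]
  simp
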